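-- pv_equiv track=rewrite | github.com/shilpasairam/shilpasairam | Pages/SLRReportPage.py | list_comparison_between_reports_data
-- ===== SOURCE A (Python) =====
-- def list_comparison_between_reports_data(source_list, compex_list, webex_list=None, word=None):
--     idx = 0
--     res_index = []
--     res_list = []
--     if webex_list is not None and word is not None:
--         for i in source_list:
--             if i != compex_list[idx] and i != webex_list[idx] and i != word[idx]:
--                 res_index.append(idx)
--             idx = idx + 1
--     elif webex_list is None and word is not None:
--         for i in source_list:
--             if i != compex_list[idx] and i != word[idx]:
--                 res_index.append(idx)
--             idx = idx + 1
--     elif webex_list is not None and word is None: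
--         for i in source_list:
--             if i != compex_list[idx] and i != webex_list[idx]:
--                 res_index.append(idx)
--             idx = idx + 1
--     else:
--         for i in source_list:
--             if i != compex_list[idx]:
--                 res_index.append(idx)
--             idx = idx + 1
--
--     if webex_list is not None and word is not None:
--         for index, n in enumerate(res_index):
--             res_list.append([source_list[n]])
--             res_list[index].append(compex_list[n])
--             res_list[index].append(webex_list[n])
--             res_list[index].append(word[n])
--     elif webex_list is None and word is not None:
--         for index, n in enumerate(res_index):
--             res_list.append([source_list[n]])
--             res_list[index].append(compex_list[n])
--             res_list[index].append(word[n])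
--     elif webex_list is not None and word is None:
--         for index, n in enumerate(res_index):
--             res_list.append([source_list[n]])
--             res_list[index].append(compex_list[n])
--             res_list[index].append(webex_list[n])
--     else:
--         for index, n in enumerate(res_index):
--             res_list.append([source_list[n]])
--             res_list[index].append(compex_list[n])
--
--     return res_list
-- ===== SOURCE B (Python) =====
-- def list_comparison_between_reports_data(source_list, compex_list, webex_list=None, word=None):
--     extras = [compex_list]
--     if webex_list is not None:
--         extras.append(webex_list)
--     if word is not None:
--         extras.append(word)
--     res_list = []
--     for idx, s in enumerate(source_list):
--         if all(s != col[idx] for col in extras):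
--             res_list.append([s] + [col[idx] for col in extras])
--     return res_list
-- ===== Notes on version B (the rewrite author's own statement) =====
-- stated objective: simpler
-- what changed: Replaces the two-pass scheme (an index-collecting loop plus a second loop rebuilding rows, each duplicated four times over the None-combinations) by one pass over enumerate(source_list) against a single 'extras' column list built up front, eliminating res_index and all branch duplication.
import Mathlib
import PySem

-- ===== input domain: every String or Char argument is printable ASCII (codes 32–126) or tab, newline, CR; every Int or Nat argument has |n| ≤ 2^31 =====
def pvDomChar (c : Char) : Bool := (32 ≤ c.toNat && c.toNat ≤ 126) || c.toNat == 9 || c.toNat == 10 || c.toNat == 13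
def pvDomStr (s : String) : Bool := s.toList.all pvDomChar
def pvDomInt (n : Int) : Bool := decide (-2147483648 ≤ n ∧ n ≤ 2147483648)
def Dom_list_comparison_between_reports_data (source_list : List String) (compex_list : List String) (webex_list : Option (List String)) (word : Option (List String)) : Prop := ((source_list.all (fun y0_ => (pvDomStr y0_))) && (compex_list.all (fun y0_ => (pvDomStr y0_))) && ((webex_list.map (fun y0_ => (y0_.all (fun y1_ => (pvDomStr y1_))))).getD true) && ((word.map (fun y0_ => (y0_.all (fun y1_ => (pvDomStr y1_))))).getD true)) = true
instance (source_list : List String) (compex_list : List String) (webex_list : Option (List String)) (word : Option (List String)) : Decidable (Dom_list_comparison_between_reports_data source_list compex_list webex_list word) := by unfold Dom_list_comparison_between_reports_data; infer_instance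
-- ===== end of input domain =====

-- B replaces A's two duplicated four-way-branched passes by one pass over enumerate(source) against an
-- up-front 'extras' column list (objective: simpler).  col[idx] is ported as pvGet (pyGetD with default
-- ""); Pre_ admits exactly the inputs where every index A (and B) evaluates is in range, so the default
-- is never the result on admitted inputs.

-- shared helper: Python's col[idx] (exact on in-range indices, which Pre_ guarantees)
def pvGet (xs : List String) (i : Int) : String := PySem.List.pyGetD xs i ""

-- ===== PORT A =====
-- A-side helpers: the shapes of A's two loops (the loop body of each of A's four branches)
def pvPass1 (src : List String) (cond : Int → String → Bool) : List Int :=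
  (src.foldl (fun (st : List Int × Int) i =>
      (if cond st.2 i then st.1 ++ [st.2] else st.1, st.2 + 1)) (([] : List Int), (0 : Int))).1

def pvPass2 (res_index : List Int) (row : Int → List String) : List (List String) :=
  res_index.foldl (fun rl n => rl ++ [row n]) []

def list_comparison_between_reports_data (source_list : List String) (compex_list : List String) (webex_list : Option (List String)) (word : Option (List String)) : List (List String) :=
  let res_index : List Int :=
    match webex_list, word with
    | some w, some d =>
        pvPass1 source_list (fun idx i => i != pvGet compex_list idx && (i != pvGet w idx && i != pvGet d idx))
    | none, some d =>
        pvPass1 source_list (fun idx i => i != pvGet compex_list idx && i != pvGet d idx)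
    | some w, none =>
        pvPass1 source_list (fun idx i => i != pvGet compex_list idx && i != pvGet w idx)
    | none, none =>
        pvPass1 source_list (fun idx i => i != pvGet compex_list idx)
  match webex_list, word with
  | some w, some d =>
      pvPass2 res_index (fun n => [pvGet source_list n, pvGet compex_list n, pvGet w n, pvGet d n])
  | none, some d =>
      pvPass2 res_index (fun n => [pvGet source_list n, pvGet compex_list n, pvGet d n])
  | some w, none =>
      pvPass2 res_index (fun n => [pvGet source_list n, pvGet compex_list n, pvGet w n])
  | none, none =>
      pvPass2 res_index (fun n => [pvGet source_list n, pvGet compex_list n])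

-- ===== PORT B =====
def list_comparison_between_reports_data_alt (source_list : List String) (compex_list : List String) (webex_list : Option (List String)) (word : Option (List String)) : List (List String) :=
  let extras : List (List String) :=
    [compex_list]
      ++ (match webex_list with | some w => [w] | none => [])
      ++ (match word with | some d => [d] | none => [])
  ((PySem.List.enumerate source_list 0).filter
      (fun p => extras.all (fun col => p.2 != pvGet col p.1))).map
    (fun p => p.2 :: extras.map (fun col => pvGet col p.1))

-- ===== PRECONDITION & SPEC =====
-- Pre_ = exactly the inputs on which Python A returns (no IndexError): every list index A's
-- short-circuiting comparisons actually evaluate is in range.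
def Pre_list_comparison_between_reports_data (source_list : List String) (compex_list : List String) (webex_list : Option (List String)) (word : Option (List String)) : Prop :=
  ∀ k < source_list.length,
    k < compex_list.length ∧
    (source_list.getD k "" ≠ compex_list.getD k "" →
      (webex_list.all (fun w => decide (k < w.length)) = true) ∧
      (webex_list.all (fun w => source_list.getD k "" != w.getD k "") = true →
        word.all (fun d => decide (k < d.length)) = true))
instance (source_list : List String) (compex_list : List String) (webex_list : Option (List String)) (word : Option (List String)) : Decidable (Pre_list_comparison_between_reports_data source_list compex_list webex_list word) := by unfold Pre_list_comparison_between_reports_data; infer_instance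

def pvWitness_list_comparison_between_reports_data : List String × List String × Option (List String) × Option (List String) :=
  (["a", "b"], ["a", "c"], some ["x", "y"], none)

def Spec_list_comparison_between_reports_data (source_list : List String) (compex_list : List String) (webex_list : Option (List String)) (word : Option (List String)) (out : List (List String)) : Prop := out = list_comparison_between_reports_data_alt source_list compex_list webex_list word
instance (source_list : List String) (compex_list : List String) (webex_list : Option (List String)) (word : Option (List String)) (out : List (List String)) : Decidable (Spec_list_comparison_between_reports_data source_list compex_list webex_list word out) := by unfold Spec_list_comparison_between_reports_data; infer_instance

-- ===== CLAIM (what is proved, stated in full; the proofs are below) =====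
def Claim_equal_list_comparison_between_reports_data : Prop := ∀ (source_list : List String) (compex_list : List String) (webex_list : Option (List String)) (word : Option (List String)), Dom_list_comparison_between_reports_data source_list compex_list webex_list word → Pre_list_comparison_between_reports_data source_list compex_list webex_list word → Spec_list_comparison_between_reports_data source_list compex_list webex_list word (list_comparison_between_reports_data source_list compex_list webex_list word)

-- ===== LEMMAS AND PROOFS =====

-- A's first pass collects exactly the indices of the enumerate-entries satisfying cond.
theorem pvPass1_loop_eq (cond : Int → String → Bool) (src : List String) :
    ∀ (s : Int) (acc : List Int),
      (src.foldl (fun (st : List Int × Int) i =>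
          (if cond st.2 i then st.1 ++ [st.2] else st.1, st.2 + 1)) (acc, s)).1
        = acc ++ ((PySem.List.enumerate src s).filter (fun p => cond p.1 p.2)).map Prod.fst := by
  induction src with
  | nil => intro s acc; simp [PySem.List.enumerate_nil]
  | cons a t ih =>
      intro s acc
      simp only [List.foldl_cons, PySem.List.enumerate_cons, List.filter_cons]
      by_cases h : cond s a = true
      · simp [h, ih (s + 1) (acc ++ [s])]
      · simp [h, ih (s + 1) acc]

theorem pvPass1_eq (cond : Int → String → Bool) (src : List String) :
    pvPass1 src cond
      = ((PySem.List.enumerate src 0).filter (fun p => cond p.1 p.2)).map Prod.fst := by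
  unfold pvPass1
  exact pvPass1_loop_eq cond src 0 []

theorem pvPass2_eq (res_index : List Int) (row : Int → List String) :
    pvPass2 res_index row = res_index.map row := by
  unfold pvPass2
  simpa using PySem.List.foldl_append_singleton_eq_map row res_index ([] : List (List String))

-- enumerate pairs (k, src[k]), so re-indexing the source at the first component gives back the element
theorem pvGet_enumerate (src : List String) (p : Int × String)
    (hp : p ∈ PySem.List.enumerate src 0) : pvGet src p.1 = p.2 := by
  rcases (PySem.List.mem_enumerate_iff src 0 p).mp hp with ⟨k, hk, rfl⟩
  simp [pvGet, PySem.List.pyGetD_natCast, List.getD_eq_getElem?_getD, hk]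

-- per-branch core: A's two passes equal B's single filtered map
theorem pv_branch_eq (src : List String) (cond : Int → String → Bool)
    (tail : Int → List String)
    (hrow : ∀ p : Int × String, p ∈ PySem.List.enumerate src 0 →
      (pvGet src p.1 :: tail p.1) = (p.2 :: tail p.1)) :
    pvPass2 (pvPass1 src cond) (fun n => pvGet src n :: tail n)
      = ((PySem.List.enumerate src 0).filter (fun p => cond p.1 p.2)).map (fun p => p.2 :: tail p.1) := by
  rw [pvPass2_eq, pvPass1_eq, List.map_map]
  refine List.map_congr_left ?_
  intro p hp
  exact hrow p (List.mem_of_mem_filter hp)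

-- ===== VERDICT (by name: the statement is the Claim_ definition above) =====
theorem list_comparison_between_reports_data_spec : Claim_equal_list_comparison_between_reports_data := by
  intro source_list compex_list webex_list word _hDom _hPre
  unfold Spec_list_comparison_between_reports_data
  unfold list_comparison_between_reports_data list_comparison_between_reports_data_alt
  cases webex_list with
  | none =>
      cases word with
      | none =>
          simpa using pv_branch_eq source_list
            (fun idx i => i != pvGet compex_list idx)
            (fun n => [pvGet compex_list n])
            (fun p hp => by rw [pvGet_enumerate source_list p hp])
      | some d =>
          simpa using pv_branch_eq source_list
            (fun idx i => i != pvGet compex_list idx && i != pvGet d idx)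
            (fun n => [pvGet compex_list n, pvGet d n])
            (fun p hp => by rw [pvGet_enumerate source_list p hp])
  | some w =>
      cases word with
      | none =>
          simpa using pv_branch_eq source_list
            (fun idx i => i != pvGet compex_list idx && i != pvGet w idx)
            (fun n => [pvGet compex_list n, pvGet w n])
            (fun p hp => by rw [pvGet_enumerate source_list p hp])
      | some d =>
          simpa using pv_branch_eq source_list
            (fun idx i => i != pvGet compex_list idx && (i != pvGet w idx && i != pvGet d idx))
            (fun n => [pvGet compex_list n, pvGet w n, pvGet d n])
            (fun p hp => by rw [pvGet_enumerate source_list p hp])
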